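-- pv_equiv track=rewrite | github.com/danny2904/RATeD | experiments/english/proposed/04_cascaded_verify_en.py | spans_string_to_indices
-- ===== SOURCE A (Python) =====
-- def merge_span_indices(spans):
--     """Gộp các span (char offsets) overlap hoặc liền kề. Input: list of [start,end] or (start,end)."""
--     if not spans:
--         return []
--     out = []
--     for s in spans:
--         a, b = int(s[0]), int(s[1])
--         if a < b:
--             out.append([a, b])
--     out.sort(key=lambda x: (x[0], x[1]))
--     merged = []
--     for a, b in out:
--         if merged and a <= merged[-1][1] + 1:
--             merged[-1][1] = max(merged[-1][1], b)
--         else: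
--             merged.append([a, b])
--     return merged
--
-- def spans_string_to_indices(text, span_strings, merge=True):
--     """Chuyển danh sách span (chuỗi) sang char offsets [start,end], tùy chọn gộp."""
--     if not text or not span_strings:
--         return []
--     indices = []
--     for s in span_strings:
--         s = (s or "").strip().strip('"\'')
--         if not s or len(s) > 200:
--             continue
--         start_search = 0
--         while True:
--             pos = text.lower().find(s.lower(), start_search)
--             if pos == -1:
--                 break
--             indices.append([pos, pos + len(s)])
--             start_search = pos + 1
--     if merge:
--         indices = merge_span_indices(indices)
--     return indices
-- ===== SOURCE B (Python) =====
-- def spans_string_to_indices(text, span_strings, merge=True):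
--     """Same result as the original; merging is done by marking covered positions
--     in a set and extracting maximal runs of consecutive marked positions."""
--     if not text or not span_strings:
--         return []
--     indices = []
--     for s in span_strings:
--         s = (s or "").strip().strip('"\'')
--         if not s or len(s) > 200:
--             continue
--         start_search = 0
--         while True:
--             pos = text.lower().find(s.lower(), start_search)
--             if pos == -1:
--                 break
--             indices.append([pos, pos + len(s)])
--             start_search = pos + 1
--     if merge:
--         cov = set()
--         for sp in indices:
--             a, b = int(sp[0]), int(sp[1])
--             if a < b:
--                 cov.update(range(a, b + 1))
--         merged = []
--         start = prev = None
--         for p in sorted(cov):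
--             if prev is not None and p == prev + 1:
--                 prev = p
--             else:
--                 if prev is not None:
--                     merged.append([start, prev])
--                 start = prev = p
--         if prev is not None:
--             merged.append([start, prev])
--         indices = merged
--     return indices
-- ===== Notes on version B (the rewrite author's own statement) =====
-- stated objective: alternative
-- what changed: The sort-then-pairwise-sweep merge of spans is replaced by a coverage representation: every position a..b of each span is marked in a set, and maximal runs of consecutive marked positions are extracted in sorted order; the substring-finding loop is unchanged.
import Mathlib
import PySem

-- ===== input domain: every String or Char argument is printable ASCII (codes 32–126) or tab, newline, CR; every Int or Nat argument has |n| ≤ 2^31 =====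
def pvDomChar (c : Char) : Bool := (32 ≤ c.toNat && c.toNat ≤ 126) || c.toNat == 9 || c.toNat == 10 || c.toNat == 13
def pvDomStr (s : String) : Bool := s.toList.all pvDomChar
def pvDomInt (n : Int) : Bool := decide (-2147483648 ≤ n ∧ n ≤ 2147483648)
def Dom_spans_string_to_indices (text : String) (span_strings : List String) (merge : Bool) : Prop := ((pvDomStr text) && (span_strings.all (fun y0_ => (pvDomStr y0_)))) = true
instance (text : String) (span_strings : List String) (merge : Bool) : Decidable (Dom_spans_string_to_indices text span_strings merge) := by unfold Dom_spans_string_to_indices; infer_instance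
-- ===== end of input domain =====

-- B replaces the sort-then-pairwise-sweep merge by marking every covered position in a
-- set and extracting maximal runs of consecutive marked positions (alternative algorithm,
-- same cost class); the substring-finding loop is unchanged.

-- ===== PORT A =====

-- bounds of the find result, cited by the find loops' termination proofs
theorem pvFindFrom_bounds (tl sl : List Char) (start : Nat)
    (h : PySem.Chars.findFrom tl sl (start : Int) none ≠ -1) :
    (start : Int) ≤ PySem.Chars.findFrom tl sl (start : Int) none ∧
      PySem.Chars.findFrom tl sl (start : Int) none ≤ tl.length := by
  by_cases hs : start ≤ tl.length
  · refine ⟨(PySem.Chars.findFrom_natCast_spec tl sl start hs h).1, ?_⟩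
    rw [PySem.Chars.findFrom_natCast tl sl start hs]
    split
    · omega
    · have := PySem.Chars.find_le_length (List.drop start tl) sl
      simp [List.length_drop] at this
      omega
  · exfalso; apply h
    simp only [PySem.Chars.findFrom]
    have : (tl.length : Int) < (start : Int) := by exact_mod_cast Nat.lt_of_not_le hs
    split_ifs with h1 h2 <;> omega

-- the inner `while True: pos = text.lower().find(s.lower(), start_search); …` loop of A
def pvFindAllA (tl sl : List Char) (slen : Int) (start : Nat) : List (List Int) :=
  let pos := PySem.Chars.findFrom tl sl (start : Int) none
  if h : pos = -1 then []
  else [pos, pos + slen] :: pvFindAllA tl sl slen (pos.toNat + 1)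
termination_by tl.length + 1 - start
decreasing_by
  have := pvFindFrom_bounds tl sl start h
  omega

-- merge_span_indices: filter a<b, sort by (x[0], x[1]), pairwise sweep mutating merged[-1][1]
-- loop body of A's filter pass (`if a < b: out.append([a, b])`)
def pvStepFilterA (out : List (List Int)) (s : List Int) : List (List Int) :=
  if PySem.List.pyGetD s 0 0 < PySem.List.pyGetD s 1 0 then
    out ++ [[PySem.List.pyGetD s 0 0, PySem.List.pyGetD s 1 0]]
  else out

-- loop body of A's sweep (`if merged and a <= merged[-1][1] + 1: …`)
def pvStepSweepA (merged : List (List Int)) (s : List Int) : List (List Int) :=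
  if merged ≠ [] ∧ PySem.List.pyGetD s 0 0 ≤ PySem.List.pyGetD (PySem.List.pyGetD merged (-1) []) 1 0 + 1 then
    merged.dropLast ++
      [[PySem.List.pyGetD (PySem.List.pyGetD merged (-1) []) 0 0,
        max (PySem.List.pyGetD (PySem.List.pyGetD merged (-1) []) 1 0) (PySem.List.pyGetD s 1 0)]]
  else merged ++ [[PySem.List.pyGetD s 0 0, PySem.List.pyGetD s 1 0]]

def pvMergeA (spans : List (List Int)) : List (List Int) :=
  if spans = [] then []
  else
    let out := spans.foldl pvStepFilterA []
    let outS := PySem.List.sorted2 out (fun x => PySem.List.pyGetD x 0 0) (fun x => PySem.List.pyGetD x 1 0)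
    outS.foldl pvStepSweepA []

def spans_string_to_indices (text : String) (span_strings : List String) (merge : Bool) : List (List Int) :=
  if text = "" ∨ span_strings = [] then []
  else
    let indices := span_strings.foldl (fun indices s0 =>
      let s := PySem.Str.stripChars (PySem.Str.strip s0) "\"'"
      if PySem.Str.len s = 0 ∨ 200 < PySem.Str.len s then indices
      else indices ++ pvFindAllA (PySem.Chars.lower text.toList) (PySem.Chars.lower s.toList) (PySem.Str.len s) 0) []
    if merge then pvMergeA indices else indices

-- ===== PORT B =====

-- Source B's find loop is textually the same loop as A's, so its port reuses pvFindAllA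

-- loop body of B's marking pass (`if a < b: cov.update(range(a, b + 1))`)
def pvStepMarkB (cov : PySem.Set Int) (sp : List Int) : PySem.Set Int :=
  if PySem.List.pyGetD sp 0 0 < PySem.List.pyGetD sp 1 0 then
    PySem.Set.update cov (PySem.List.pyRange (PySem.List.pyGetD sp 0 0) (PySem.List.pyGetD sp 1 0 + 1))
  else cov

-- loop body of B's run extraction over the sorted marked positions
def pvStepRunB (acc : List (List Int) × Option (Int × Int)) (p : Int) :
    List (List Int) × Option (Int × Int) :=
  match acc.2 with
  | some (st, pv) =>
    if p = pv + 1 then (acc.1, some (st, p))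
    else (acc.1 ++ [[st, pv]], some (p, p))
  | none => (acc.1, some (p, p))

def pvMergeB (spans : List (List Int)) : List (List Int) :=
  let cov : PySem.Set Int := spans.foldl pvStepMarkB PySem.Set.empty
  let fin := (PySem.List.sorted cov (fun x => x)).foldl pvStepRunB ([], none)
  match fin.2 with
  | some (st, pv) => fin.1 ++ [[st, pv]]
  | none => fin.1

def spans_string_to_indices_alt (text : String) (span_strings : List String) (merge : Bool) : List (List Int) :=
  if text = "" ∨ span_strings = [] then []
  else
    let indices := span_strings.foldl (fun indices s0 =>
      let s := PySem.Str.stripChars (PySem.Str.strip s0) "\"'"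
      if PySem.Str.len s = 0 ∨ 200 < PySem.Str.len s then indices
      else indices ++ pvFindAllA (PySem.Chars.lower text.toList) (PySem.Chars.lower s.toList) (PySem.Str.len s) 0) []
    if merge then pvMergeB indices else indices

-- ===== PRECONDITION & SPEC =====
def Spec_spans_string_to_indices (text : String) (span_strings : List String) (merge : Bool) (out : List (List Int)) : Prop := out = spans_string_to_indices_alt text span_strings merge
instance (text : String) (span_strings : List String) (merge : Bool) (out : List (List Int)) : Decidable (Spec_spans_string_to_indices text span_strings merge out) := by unfold Spec_spans_string_to_indices; infer_instance

-- ===== CLAIM (what is proved, stated in full; the proofs are below) =====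
def Claim_equal_spans_string_to_indices : Prop := ∀ (text : String) (span_strings : List String) (merge : Bool), Dom_spans_string_to_indices text span_strings merge → Spec_spans_string_to_indices text span_strings merge (spans_string_to_indices text span_strings merge)

-- ===== LEMMAS AND PROOFS =====

-- pair-level view of span lists: [a, b] ↔ (a, b)
def pvToL (p : Int × Int) : List Int := [p.1, p.2]

-- the pairs A's filter keeps / B's marking loop uses
def pvPairs (spans : List (List Int)) : List (Int × Int) :=
  (spans.map (fun s => (PySem.List.pyGetD s 0 0, PySem.List.pyGetD s 1 0))).filter
    (fun p => decide (p.1 < p.2))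

-- positions covered by a list of inclusive intervals
def pvCov (M : List (Int × Int)) (x : Int) : Prop := ∃ r ∈ M, r.1 ≤ x ∧ x ≤ r.2

-- a canonical run decomposition: nonempty intervals, pairwise separated by a gap ≥ 2
def pvRunList (M : List (Int × Int)) : Prop :=
  M.Pairwise (fun r s => r.2 + 1 < s.1) ∧ ∀ r ∈ M, r.1 ≤ r.2

-- pair-level form of A's sweep
def pvSweepGo : Int × Int → List (Int × Int) → List (Int × Int)
  | r, [] => [r]
  | (la, lb), (a, b) :: t =>
    if a ≤ lb + 1 then pvSweepGo (la, max lb b) t else (la, lb) :: pvSweepGo (a, b) t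

-- pair-level form of B's run extraction
def pvRunsGo : Int → Int → List Int → List (Int × Int)
  | st, pv, [] => [(st, pv)]
  | st, pv, q :: qs => if q = pv + 1 then pvRunsGo st q qs else (st, pv) :: pvRunsGo q q qs


-- small index fact
theorem pvGet1 (a b : Int) : PySem.List.pyGetD [a, b] 1 0 = b := rfl

-- A's filter loop builds exactly the kept pairs
theorem pvOut_eq (spans : List (List Int)) (acc : List (List Int)) :
    spans.foldl pvStepFilterA acc = acc ++ (pvPairs spans).map pvToL := by
  induction spans generalizing acc with
  | nil => simp [pvPairs]
  | cons s t ih =>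
    by_cases hc : PySem.List.pyGetD s 0 0 < PySem.List.pyGetD s 1 0 <;>
      simp [pvPairs, pvStepFilterA, hc, ih, pvToL]

-- insertion keeps an insertion-sorted list sorted (generic insertion-order relation)
theorem pvInsertBy_pairwise {α : Type} (before : α → α → Bool)
    (hasym : ∀ a b, before a b = true → before b a = false)
    (htrans : ∀ a b c, before a b = true → before b c = true → before a c = true)
    (x : α) (ys : List α) (hy : ys.Pairwise (fun a b => before b a = false)) :
    (PySem.List.insertBy before x ys).Pairwise (fun a b => before b a = false) := by
  induction ys with
  | nil => simp [PySem.List.insertBy]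
  | cons y ys ih =>
    rw [List.pairwise_cons] at hy
    obtain ⟨hyall, hys⟩ := hy
    by_cases hb : before x y = true
    · rw [PySem.List.insertBy, if_pos hb]
      refine List.Pairwise.cons ?_ (List.Pairwise.cons hyall hys)
      intro z hz
      rcases List.mem_cons.mp hz with rfl | hz
      · exact hasym _ _ hb
      · -- before z x must be false: else before z y via trans, contradicting hyall
        by_contra hzx
        have hzx' : before z x = true := by
          cases hzxv : before z x with
          | false => exact absurd hzxv hzx
          | true => rfl
        have := htrans z x y hzx' hb
        rw [hyall z hz] at this
        exact Bool.false_ne_true this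
    · rw [PySem.List.insertBy, if_neg hb]
      refine List.Pairwise.cons ?_ (ih hys)
      intro z hz
      rcases (PySem.List.mem_insertBy before x z ys).mp hz with rfl | hz
      · simpa using hb
      · exact hyall z hz
theorem pvFoldl_insertBy_pairwise {α : Type} (before : α → α → Bool)
    (hasym : ∀ a b, before a b = true → before b a = false)
    (htrans : ∀ a b c, before a b = true → before b c = true → before a c = true)
    (xs : List α) (acc : List α) (hacc : acc.Pairwise (fun a b => before b a = false)) :
    (xs.foldl (fun acc x => PySem.List.insertBy before x acc) acc).Pairwise
      (fun a b => before b a = false) := by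
  induction xs generalizing acc with
  | nil => exact hacc
  | cons x xs ih => exact ih _ (pvInsertBy_pairwise before hasym htrans x acc hacc)

-- sorted2 with Int keys is ordered by the first key
theorem pvSorted2_pairwise {α : Type} (xs : List α) (k1 k2 : α → Int) :
    (PySem.List.sorted2 xs k1 k2).Pairwise (fun p q => k1 p ≤ k1 q) := by
  have h := pvFoldl_insertBy_pairwise
    (fun a b => decide (k1 a < k1 b) || (!decide (k1 b < k1 a) && decide (k2 a < k2 b)))
    (by intro a b hab; simp at hab ⊢; omega)
    (by intro a b c hab hbc; simp at hab hbc ⊢; omega)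
    xs [] (List.Pairwise.nil)
  have h' : List.Pairwise (fun a b =>
      (decide (k1 b < k1 a) || (!decide (k1 a < k1 b) && decide (k2 b < k2 a))) = false)
      (PySem.List.sorted2 xs k1 k2) := by
    simpa [PySem.List.sorted2] using h
  refine List.Pairwise.imp (fun hab => ?_) h'
  simp at hab
  omega

-- sorted2 commutes with map when the keys factor through the map
theorem pvInsertBy_map {α β : Type} (before : β → β → Bool) (f : α → β) (x : α) (ys : List α) :
    PySem.List.insertBy before (f x) (ys.map f)
      = (PySem.List.insertBy (fun a b => before (f a) (f b)) x ys).map f := by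
  induction ys with
  | nil => simp [PySem.List.insertBy]
  | cons y ys ih =>
    rw [List.map_cons, PySem.List.insertBy, PySem.List.insertBy]
    by_cases hb : before (f x) (f y) = true <;> simp [hb, ih]
theorem pvSorted2_map {α β : Type} (xs : List α) (f : α → β) (k1 k2 : β → Int) :
    PySem.List.sorted2 (xs.map f) k1 k2
      = (PySem.List.sorted2 xs (fun a => k1 (f a)) (fun a => k2 (f a))).map f := by
  simp only [PySem.List.sorted2]
  suffices h : ∀ acc : List α,
      (xs.map f).foldl (fun acc x => PySem.List.insertBy _ x acc) (acc.map f)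
        = ((xs.foldl (fun acc x => PySem.List.insertBy _ x acc) acc).map f) by
    simpa using h []
  intro acc
  induction xs generalizing acc with
  | nil => rfl
  | cons x xs ih => simp only [List.map_cons, List.foldl_cons, pvInsertBy_map, ih]

theorem pvCov_cons (r : Int × Int) (t : List (Int × Int)) (x : Int) :
    pvCov (r :: t) x ↔ (r.1 ≤ x ∧ x ≤ r.2) ∨ pvCov t x := by
  simp [pvCov, List.mem_cons, or_and_right, exists_or]

theorem pvCov_nil (x : Int) : pvCov [] x ↔ False := by simp [pvCov]

-- A's sweep, bridged from the list-of-lists fold to the pair level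
theorem pvSweep_bridge (P : List (Int × Int)) : ∀ (D : List (Int × Int)) (r : Int × Int),
    (P.map pvToL).foldl pvStepSweepA ((D.map pvToL) ++ [pvToL r])
      = (D ++ pvSweepGo r P).map pvToL := by
  induction P with
  | nil => intro D r; simp [pvSweepGo]
  | cons p t ih =>
    intro D r
    obtain ⟨a, b⟩ := p
    obtain ⟨la, lb⟩ := r
    rw [List.map_cons, List.foldl_cons]
    by_cases hc : a ≤ lb + 1
    · rw [show pvStepSweepA ((D.map pvToL) ++ [pvToL (la, lb)]) (pvToL (a, b))
          = (D.map pvToL) ++ [pvToL (la, max lb b)] from by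
        simp [pvStepSweepA, pvToL, pvGet1, hc]]
      rw [ih D (la, max lb b)]
      rw [show pvSweepGo (la, lb) ((a, b) :: t) = pvSweepGo (la, max lb b) t from by
        rw [pvSweepGo]; exact if_pos hc]
    · rw [show pvStepSweepA ((D.map pvToL) ++ [pvToL (la, lb)]) (pvToL (a, b))
          = ((D ++ [(la, lb)]).map pvToL) ++ [pvToL (a, b)] from by
        simp [pvStepSweepA, pvToL, pvGet1, hc]]
      rw [ih (D ++ [(la, lb)]) (a, b)]
      rw [show pvSweepGo (la, lb) ((a, b) :: t) = (la, lb) :: pvSweepGo (a, b) t from by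
        rw [pvSweepGo]; exact if_neg hc]
      simp

-- A's sweep produces the run decomposition of the covered positions
theorem pvSweepGo_spec (P : List (Int × Int)) : ∀ la lb, la ≤ lb →
    (∀ p ∈ P, p.1 < p.2) → P.Pairwise (fun p q => p.1 ≤ q.1) → (∀ p ∈ P, la ≤ p.1) →
    ∃ lb' rest, pvSweepGo (la, lb) P = (la, lb') :: rest ∧ lb ≤ lb' ∧
      pvRunList ((la, lb') :: rest) ∧
      (∀ x, pvCov ((la, lb') :: rest) x ↔ (la ≤ x ∧ x ≤ lb) ∨ pvCov P x) := by
  induction P with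
  | nil =>
    intro la lb h1 _ _ _
    exact ⟨lb, [], rfl, le_refl _, ⟨by simp, by simpa [pvRunList] using h1⟩,
      fun x => by simp [pvCov_cons, pvCov_nil]⟩
  | cons p t ih =>
    intro la lb hle hlt hpw hge
    obtain ⟨a, b⟩ := p
    rw [List.pairwise_cons] at hpw
    have ha : la ≤ a := hge (a, b) List.mem_cons_self
    have hab : a < b := hlt (a, b) List.mem_cons_self
    by_cases hc : a ≤ lb + 1
    · rw [show pvSweepGo (la, lb) ((a, b) :: t) = pvSweepGo (la, max lb b) t from by
        rw [pvSweepGo]; exact if_pos hc]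
      obtain ⟨lb', rest, heq, hlb, hrun, hcov⟩ := ih la (max lb b)
        (le_trans hle (le_max_left _ _))
        (fun p hp => hlt p (List.mem_cons_of_mem _ hp)) hpw.2
        (fun p hp => le_trans ha (hpw.1 p hp))
      refine ⟨lb', rest, heq, le_trans (le_max_left _ _) hlb, hrun, fun x => ?_⟩
      rw [hcov x, pvCov_cons]
      by_cases hC : pvCov t x <;> simp [hC] <;> omega
    · rw [show pvSweepGo (la, lb) ((a, b) :: t) = (la, lb) :: pvSweepGo (a, b) t from by
        rw [pvSweepGo]; exact if_neg hc]
      obtain ⟨b', rest', heq', hb', hrun', hcov'⟩ := ih a b (le_of_lt hab)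
        (fun p hp => hlt p (List.mem_cons_of_mem _ hp)) hpw.2 hpw.1
      rw [heq']
      obtain ⟨hrp, hrn⟩ := hrun'
      rw [List.pairwise_cons] at hrp
      refine ⟨lb, (a, b') :: rest', rfl, le_refl _, ⟨?_, ?_⟩, fun x => ?_⟩
      · rw [List.pairwise_cons]
        refine ⟨?_, List.pairwise_cons.mpr hrp⟩
        intro s hs
        rcases List.mem_cons.mp hs with rfl | hs
        · simp; omega
        · have h1 := hrp.1 s hs
          have h2 : a ≤ b' := hrn (a, b') List.mem_cons_self
          simp at h1 ⊢
          omega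
      · intro r hr
        rcases List.mem_cons.mp hr with rfl | hr
        · exact hle
        · exact hrn r hr
      · have h3 := hcov' x
        rw [pvCov_cons] at h3
        simp only [pvCov_cons]
        simp only at h3 ⊢
        tauto

-- B's run extraction produces the run decomposition of the marked positions
theorem pvRunsGo_spec (L : List Int) : ∀ st pv, st ≤ pv → L.Pairwise (· < ·) → (∀ q ∈ L, pv < q) →
    ∃ e rest, pvRunsGo st pv L = (st, e) :: rest ∧ pv ≤ e ∧ pvRunList ((st, e) :: rest) ∧
      ∀ x, pvCov ((st, e) :: rest) x ↔ (st ≤ x ∧ x ≤ pv) ∨ x ∈ L := by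
  induction L with
  | nil =>
    intro st pv h1 _ _
    exact ⟨pv, [], rfl, le_refl _, ⟨by simp, by simpa [pvRunList] using h1⟩,
      fun x => by simp [pvCov_cons, pvCov_nil]⟩
  | cons q qs ih =>
    intro st pv hle hpw hgt
    rw [List.pairwise_cons] at hpw
    have hq : pv < q := hgt q List.mem_cons_self
    by_cases hc : q = pv + 1
    · rw [show pvRunsGo st pv (q :: qs) = pvRunsGo st q qs from by
        rw [pvRunsGo]; exact if_pos hc]
      obtain ⟨e, rest, heq, he, hrun, hcov⟩ := ih st q (by omega) hpw.2 hpw.1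
      refine ⟨e, rest, heq, by omega, hrun, fun x => ?_⟩
      rw [hcov x]
      simp only [List.mem_cons]
      constructor
      · rintro (h | h)
        · omega
        · tauto
      · rintro (h | rfl | h)
        · left; omega
        · left; omega
        · tauto
    · rw [show pvRunsGo st pv (q :: qs) = (st, pv) :: pvRunsGo q q qs from by
        rw [pvRunsGo]; exact if_neg hc]
      obtain ⟨e, rest, heq, he, hrun, hcov⟩ := ih q q (le_refl _) hpw.2 hpw.1
      rw [heq]
      obtain ⟨hrp, hrn⟩ := hrun
      rw [List.pairwise_cons] at hrp
      refine ⟨pv, (q, e) :: rest, rfl, le_refl _, ⟨?_, ?_⟩, fun x => ?_⟩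
      · rw [List.pairwise_cons]
        refine ⟨?_, List.pairwise_cons.mpr hrp⟩
        intro s hs
        rcases List.mem_cons.mp hs with rfl | hs
        · simp; omega
        · have h1 := hrp.1 s hs
          have h2 : q ≤ e := hrn (q, e) List.mem_cons_self
          simp at h1 ⊢
          omega
      · intro r hr
        rcases List.mem_cons.mp hr with rfl | hr
        · exact hle
        · exact hrn r hr
      · have h3 := hcov x
        rw [pvCov_cons] at h3
        simp only [pvCov_cons, List.mem_cons]
        simp only at h3 ⊢
        rw [h3]
        by_cases hxq : x ∈ qs <;> simp [hxq] <;> omega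

-- every covered position of a run list is ≥ the first run's start
theorem pvCov_ge (t : List (Int × Int)) : ∀ (r : Int × Int), pvRunList (r :: t) →
    ∀ x, pvCov (r :: t) x → r.1 ≤ x := by
  induction t with
  | nil =>
    intro r _ x hx
    rw [pvCov_cons] at hx
    rcases hx with h | h
    · exact h.1
    · rw [pvCov_nil] at h; exact absurd h id
  | cons s t' ih =>
    intro r hrun x hx
    obtain ⟨hp, hn⟩ := hrun
    rw [List.pairwise_cons] at hp
    rw [pvCov_cons] at hx
    rcases hx with h | h
    · exact h.1
    · have := ih s ⟨hp.2, fun r hr => hn r (List.mem_cons_of_mem _ hr)⟩ x h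
      have h1 := hp.1 s List.mem_cons_self
      have h2 := hn r List.mem_cons_self
      omega

-- run decompositions with the same covered positions are equal
theorem pvRun_unique (M : List (Int × Int)) : ∀ (M' : List (Int × Int)), pvRunList M →
    pvRunList M' → (∀ x, pvCov M x ↔ pvCov M' x) → M = M' := by
  induction M with
  | nil =>
    intro M' _ h' hcov
    cases M' with
    | nil => rfl
    | cons r' t' =>
      exfalso
      have : pvCov (r' :: t') r'.1 := by
        rw [pvCov_cons]; left; exact ⟨le_refl _, h'.2 r' List.mem_cons_self⟩
      rw [← hcov r'.1, pvCov_nil] at this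
      exact this
  | cons r t ih =>
    intro M' h h' hcov
    cases M' with
    | nil =>
      exfalso
      have : pvCov (r :: t) r.1 := by
        rw [pvCov_cons]; left; exact ⟨le_refl _, h.2 r List.mem_cons_self⟩
      rw [hcov r.1, pvCov_nil] at this
      exact this
    | cons r' t' =>
      have hne : r.1 ≤ r.2 := h.2 r List.mem_cons_self
      have hne' : r'.1 ≤ r'.2 := h'.2 r' List.mem_cons_self
      -- equal starts
      have hstart : r.1 = r'.1 := by
        have h1 : pvCov (r' :: t') r.1 := by
          rw [← hcov]; rw [pvCov_cons]; left; exact ⟨le_refl _, hne⟩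
        have h2 : pvCov (r :: t) r'.1 := by
          rw [hcov]; rw [pvCov_cons]; left; exact ⟨le_refl _, hne'⟩
        have := pvCov_ge t' r' h' r.1 h1
        have := pvCov_ge t r h r'.1 h2
        omega
      -- no position beyond the first run's end, up to the gap
      have hgap : ∀ x, r.2 < x → pvCov (r :: t) x → pvCov t x ∧ r.2 + 1 < x := by
        intro x hx hcx
        rw [pvCov_cons] at hcx
        rcases hcx with hh | hh
        · omega
        · refine ⟨hh, ?_⟩
          cases t with
          | nil => rw [pvCov_nil] at hh; exact absurd hh id
          | cons s t2 =>
            have hs := pvCov_ge t2 s ⟨(List.pairwise_cons.mp h.1).2,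
              fun q hq => h.2 q (List.mem_cons_of_mem _ hq)⟩ x hh
            have := (List.pairwise_cons.mp h.1).1 s List.mem_cons_self
            omega
      have hgap' : ∀ x, r'.2 < x → pvCov (r' :: t') x → pvCov t' x ∧ r'.2 + 1 < x := by
        intro x hx hcx
        rw [pvCov_cons] at hcx
        rcases hcx with hh | hh
        · omega
        · refine ⟨hh, ?_⟩
          cases t' with
          | nil => rw [pvCov_nil] at hh; exact absurd hh id
          | cons s t2 =>
            have hs := pvCov_ge t2 s ⟨(List.pairwise_cons.mp h'.1).2,
              fun q hq => h'.2 q (List.mem_cons_of_mem _ hq)⟩ x hh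
            have := (List.pairwise_cons.mp h'.1).1 s List.mem_cons_self
            omega
      -- equal ends
      have hend : r.2 = r'.2 := by
        by_contra hne2
        rcases lt_or_gt_of_ne hne2 with hlt2 | hlt2
        · have hcx : pvCov (r' :: t') (r.2 + 1) := by
            rw [pvCov_cons]; left; constructor <;> omega
          rw [← hcov] at hcx
          have := hgap (r.2 + 1) (by omega) hcx
          omega
        · have hcx : pvCov (r :: t) (r'.2 + 1) := by
            rw [pvCov_cons]; left; constructor <;> omega
          rw [hcov] at hcx
          have := hgap' (r'.2 + 1) (by omega) hcx
          omega
      -- tails cover the same positions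
      have htails : ∀ x, pvCov t x ↔ pvCov t' x := by
        intro x
        constructor
        · intro hx
          have hge2 : r.2 + 1 < x := by
            cases t with
            | nil => rw [pvCov_nil] at hx; exact absurd hx id
            | cons s t2 =>
              have hs := pvCov_ge t2 s ⟨(List.pairwise_cons.mp h.1).2,
                fun q hq => h.2 q (List.mem_cons_of_mem _ hq)⟩ x hx
              have := (List.pairwise_cons.mp h.1).1 s List.mem_cons_self
              omega
          have hcx : pvCov (r' :: t') x := by
            rw [← hcov, pvCov_cons]; right; exact hx
          exact (hgap' x (by omega) hcx).1
        · intro hx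
          have hge2 : r'.2 + 1 < x := by
            cases t' with
            | nil => rw [pvCov_nil] at hx; exact absurd hx id
            | cons s t2 =>
              have hs := pvCov_ge t2 s ⟨(List.pairwise_cons.mp h'.1).2,
                fun q hq => h'.2 q (List.mem_cons_of_mem _ hq)⟩ x hx
              have := (List.pairwise_cons.mp h'.1).1 s List.mem_cons_self
              omega
          have hcx : pvCov (r :: t) x := by
            rw [hcov, pvCov_cons]; right; exact hx
          exact (hgap x (by omega) hcx).1
      have ht : t = t' := ih t'
        ⟨(List.pairwise_cons.mp h.1).2, fun q hq => h.2 q (List.mem_cons_of_mem _ hq)⟩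
        ⟨(List.pairwise_cons.mp h'.1).2, fun q hq => h'.2 q (List.mem_cons_of_mem _ hq)⟩
        htails
      have hr : r = r' := Prod.ext hstart hend
      rw [hr, ht]

theorem pvCov_perm {M M' : List (Int × Int)} (h : M.Perm M') (x : Int) :
    pvCov M x ↔ pvCov M' x := by
  unfold pvCov
  constructor <;> rintro ⟨r, hr, hx⟩
  · exact ⟨r, h.mem_iff.mp hr, hx⟩
  · exact ⟨r, h.mem_iff.mpr hr, hx⟩

-- membership in B's marking fold
theorem pvCovB_mem (spans : List (List Int)) : ∀ (c : PySem.Set Int) (x : Int),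
    x ∈ spans.foldl pvStepMarkB c ↔ x ∈ c ∨ pvCov (pvPairs spans) x := by
  induction spans with
  | nil => intro c x; simp [pvPairs, pvCov]
  | cons sp t ih =>
    intro c x
    rw [List.foldl_cons]
    by_cases hc : PySem.List.pyGetD sp 0 0 < PySem.List.pyGetD sp 1 0
    · rw [show pvStepMarkB c sp = PySem.Set.update c
          (PySem.List.pyRange (PySem.List.pyGetD sp 0 0) (PySem.List.pyGetD sp 1 0 + 1)) from by
        simp [pvStepMarkB, hc]]
      rw [ih]
      have hp : pvPairs (sp :: t) =
          (PySem.List.pyGetD sp 0 0, PySem.List.pyGetD sp 1 0) :: pvPairs t := by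
        simp [pvPairs, hc]
      rw [hp, pvCov_cons, PySem.Set.mem_update]
      simp only [PySem.List.mem_pyRange_one]
      constructor
      · rintro ((h | h) | h)
        · tauto
        · right; left; constructor <;> omega
        · tauto
      · rintro (h | (h | h))
        · tauto
        · left; right; constructor <;> omega
        · tauto
    · rw [show pvStepMarkB c sp = c from by simp [pvStepMarkB, hc]]
      rw [ih]
      have hp : pvPairs (sp :: t) = pvPairs t := by simp [pvPairs, hc]
      rw [hp]

theorem pvCovB_nodup (spans : List (List Int)) : ∀ (c : PySem.Set Int), c.Nodup →
    (spans.foldl pvStepMarkB c).Nodup := by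
  induction spans with
  | nil => intro c hcn; exact hcn
  | cons sp t ih =>
    intro c hcn
    rw [List.foldl_cons]
    unfold pvStepMarkB
    by_cases hc : PySem.List.pyGetD sp 0 0 < PySem.List.pyGetD sp 1 0
    · rw [if_pos hc]; exact ih _ (PySem.Set.nodup_update c _ hcn)
    · rw [if_neg hc]; exact ih _ hcn

-- B's run-extraction fold, bridged to the pair level
theorem pvRuns_bridge (L : List Int) : ∀ (D : List (Int × Int)) (st pv : Int),
    (match (L.foldl pvStepRunB ((D.map pvToL), some (st, pv))).2 with
      | some (s, p) => (L.foldl pvStepRunB ((D.map pvToL), some (st, pv))).1 ++ [[s, p]]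
      | none => (L.foldl pvStepRunB ((D.map pvToL), some (st, pv))).1)
      = (D ++ pvRunsGo st pv L).map pvToL := by
  induction L with
  | nil => intro D st pv; simp [pvRunsGo, pvToL]
  | cons q qs ih =>
    intro D st pv
    rw [List.foldl_cons]
    by_cases hc : q = pv + 1
    · rw [show pvStepRunB ((D.map pvToL), some (st, pv)) q = ((D.map pvToL), some (st, q)) from by
        simp [pvStepRunB, hc]]
      rw [ih D st q]
      rw [show pvRunsGo st pv (q :: qs) = pvRunsGo st q qs from by
        rw [pvRunsGo]; exact if_pos hc]
    · rw [show pvStepRunB ((D.map pvToL), some (st, pv)) q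
          = (((D ++ [(st, pv)]).map pvToL), some (q, q)) from by
        simp [pvStepRunB, hc, pvToL]]
      rw [ih (D ++ [(st, pv)]) q q]
      rw [show pvRunsGo st pv (q :: qs) = (st, pv) :: pvRunsGo q q qs from by
        rw [pvRunsGo]; exact if_neg hc]
      simp

theorem pvMergeAB (spans : List (List Int)) : pvMergeA spans = pvMergeB spans := by
  by_cases hsp : spans = []
  · subst hsp; rfl
  · simp only [pvMergeA, pvMergeB, if_neg hsp]
    rw [pvOut_eq spans [], List.nil_append, pvSorted2_map]
    set s2 := PySem.List.sorted2 (pvPairs spans)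
      (fun a => PySem.List.pyGetD (pvToL a) 0 0) (fun a => PySem.List.pyGetD (pvToL a) 1 0)
      with hs2def
    have hperm : s2.Perm (pvPairs spans) := PySem.List.sorted2_perm _ _ _ _
    have hpw : s2.Pairwise (fun p q => p.1 ≤ q.1) := pvSorted2_pairwise _ _ _
    have helts : ∀ p ∈ s2, p.1 < p.2 := by
      intro p hp
      have hmem : p ∈ pvPairs spans := hperm.mem_iff.mp hp
      unfold pvPairs at hmem
      have := (List.mem_filter.mp hmem).2
      simpa using this
    set C := spans.foldl pvStepMarkB PySem.Set.empty with hCdef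
    have hmemC : ∀ x, x ∈ C ↔ pvCov (pvPairs spans) x := by
      intro x
      rw [hCdef, pvCovB_mem]
      simp [PySem.Set.empty]
    have hndC : C.Nodup := pvCovB_nodup spans _ List.nodup_nil
    set L := PySem.List.sorted C (fun x => x) with hLdef
    have hmemL : ∀ x, x ∈ L ↔ pvCov (pvPairs spans) x := fun x => by
      rw [hLdef, PySem.List.mem_sorted]
      exact hmemC x
    have hltL : L.Pairwise (· < ·) := by
      have h1 := PySem.List.sorted_pairwise C (fun x => x)
      have h2 : L.Nodup := (PySem.List.sorted_perm C (fun x => x) false).nodup_iff.mpr hndC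
      exact (h1.and h2).imp (fun h => lt_of_le_of_ne h.1 h.2)
    by_cases hpe : pvPairs spans = []
    · have hs2 : s2 = [] := (hpe ▸ hperm).eq_nil
      have hC : C = [] := List.eq_nil_iff_forall_not_mem.mpr (fun x hx => by
        rw [hmemC, hpe, pvCov_nil] at hx
        exact hx)
      have hL : L = [] := by rw [hLdef, hC]; rfl
      rw [hs2, hL]
      rfl
    · have hs2ne : s2 ≠ [] := fun h => hpe ((h ▸ hperm).symm.eq_nil)
      obtain ⟨p0, t2, hs2c⟩ := List.exists_cons_of_ne_nil hs2ne
      obtain ⟨a0, b0⟩ := p0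
      have hLne : L ≠ [] := by
        cases hpp : pvPairs spans with
        | nil => exact absurd hpp hpe
        | cons p ps =>
          have hpmem : p ∈ pvPairs spans := by rw [hpp]; exact List.mem_cons_self
          have hlt : p.1 < p.2 := by
            unfold pvPairs at hpmem
            simpa using (List.mem_filter.mp hpmem).2
          have : p.1 ∈ L := (hmemL p.1).mpr ⟨p, hpmem, le_refl _, le_of_lt hlt⟩
          exact List.ne_nil_of_mem this
      obtain ⟨q0, qs, hLc⟩ := List.exists_cons_of_ne_nil hLne
      have hpwc := hs2c ▸ hpw
      rw [List.pairwise_cons] at hpwc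
      have heltsc : ∀ p ∈ t2, p.1 < p.2 := fun p hp =>
        helts p (hs2c ▸ List.mem_cons_of_mem _ hp)
      have hab0 : a0 < b0 := helts (a0, b0) (hs2c ▸ List.mem_cons_self)
      have hltLc := hLc ▸ hltL
      rw [List.pairwise_cons] at hltLc
      -- A side: first sweep step then the bridge
      rw [hs2c, List.map_cons, List.foldl_cons]
      rw [show pvStepSweepA [] (pvToL (a0, b0))
          = (([] : List (Int × Int)).map pvToL) ++ [pvToL (a0, b0)] from by
        simp [pvStepSweepA, pvToL, pvGet1]]
      rw [pvSweep_bridge t2 [] (a0, b0), List.nil_append]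
      -- B side: first run step then the bridge
      rw [hLc, List.foldl_cons]
      rw [show pvStepRunB ([], none) q0 = (([] : List (Int × Int)).map pvToL, some (q0, q0)) from rfl]
      rw [pvRuns_bridge qs [] q0 q0, List.nil_append]
      -- both are run decompositions of the same covered set
      obtain ⟨lbA, restA, heqA, _, hrunA, hcovA⟩ :=
        pvSweepGo_spec t2 a0 b0 (le_of_lt hab0) heltsc hpwc.2 hpwc.1
      obtain ⟨eB, restB, heqB, _, hrunB, hcovB⟩ :=
        pvRunsGo_spec qs q0 q0 (le_refl _) hltLc.2 hltLc.1
      rw [heqA, heqB]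
      have hcovEq : ∀ x, pvCov ((a0, lbA) :: restA) x ↔ pvCov ((q0, eB) :: restB) x := by
        intro x
        rw [hcovA x, hcovB x]
        have h1 : (a0 ≤ x ∧ x ≤ b0) ∨ pvCov t2 x ↔ pvCov (pvPairs spans) x := by
          rw [← pvCov_cons (a0, b0) t2 x, ← hs2c]
          exact pvCov_perm hperm x
        have h2 : (q0 ≤ x ∧ x ≤ q0) ∨ x ∈ qs ↔ pvCov (pvPairs spans) x := by
          rw [← hmemL x, hLc, List.mem_cons]
          constructor
          · rintro (h | h)
            · left; omega
            · right; exact h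
          · rintro (rfl | h)
            · left; omega
            · right; exact h
        rw [h1, h2]
      rw [pvRun_unique ((a0, lbA) :: restA) ((q0, eB) :: restB) hrunA hrunB hcovEq]

theorem spans_string_to_indices_spec : Claim_equal_spans_string_to_indices := by
  intro text span_strings merge _
  unfold Spec_spans_string_to_indices spans_string_to_indices spans_string_to_indices_alt
  simp only [pvMergeAB]
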